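-- pv_equiv track=rewrite | github.com/starsummer/OCR-models | tools/utils.py | index2text
-- ===== SOURCE A (Python) =====
-- def index2text(index_arr,index2char,ctc=False):
--     line_arr = []
--     for index_seq in index_arr:
--         line = ''
--
--         if ctc: #
--             for index in index_seq:
--                 char = index2char[index]
--                 if char == 'EOF':
--                     break
--                 if char == 'blank':
--                     line += '&&blank&&'
--                 else:
--                     line += char
--             items = [remove_same(item) for item in line.split('&&blank&&')]
--             line = ''.join(items)
--         else: #直接将index转化为text
--             for index in index_seq:
--                 char = index2char[index]
--                 if char == 'EOF':
--                     break
--                 line += char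
--         line_arr.append(line)
--     return line_arr
--
-- def remove_same(line):
--     rel = ''
--     last_char = ''
--     for char in line:
--         if char == last_char:
--             continue
--         rel += char
--         last_char = char
--     return rel
-- ===== SOURCE B (Python) =====
-- def index2text(index_arr, index2char, ctc=False):
--     line_arr = []
--     for index_seq in index_arr:
--         chars = []
--         if ctc:  # one pass: drop blanks, merge repeats within a blank-separated run
--             last = None
--             for index in index_seq:
--                 tok = index2char[index]
--                 if tok == 'EOF':
--                     break
--                 if tok == 'blank':
--                     last = None
--                     continue
--                 for ch in tok:
--                     if ch != last:
--                         chars.append(ch)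
--                         last = ch
--         else:
--             for index in index_seq:
--                 tok = index2char[index]
--                 if tok == 'EOF':
--                     break
--                 chars.append(tok)
--         line_arr.append(''.join(chars))
--     return line_arr
-- ===== Notes on version B (the rewrite author's own statement) =====
-- stated objective: simpler
-- what changed: The ctc branch no longer builds a line with an internal '&&blank&&' marker string, splits it and post-processes each piece with the remove_same helper: B does the CTC collapse in one pass over the index sequence, carrying a None-reset 'last' character, appending a character only when it differs from the last one emitted; the non-ctc branch is kept.
-- outside the precondition, e.g. on index2text([[0, 5]], {0: 'EOF'}, False): A returns [''], B returns ['']; on index2text([[0, 1, 0]], {0: 'a', 1: '&&blank&&'}, True): A returns ['aa'], B returns ['a&blank&a']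
import Mathlib
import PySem

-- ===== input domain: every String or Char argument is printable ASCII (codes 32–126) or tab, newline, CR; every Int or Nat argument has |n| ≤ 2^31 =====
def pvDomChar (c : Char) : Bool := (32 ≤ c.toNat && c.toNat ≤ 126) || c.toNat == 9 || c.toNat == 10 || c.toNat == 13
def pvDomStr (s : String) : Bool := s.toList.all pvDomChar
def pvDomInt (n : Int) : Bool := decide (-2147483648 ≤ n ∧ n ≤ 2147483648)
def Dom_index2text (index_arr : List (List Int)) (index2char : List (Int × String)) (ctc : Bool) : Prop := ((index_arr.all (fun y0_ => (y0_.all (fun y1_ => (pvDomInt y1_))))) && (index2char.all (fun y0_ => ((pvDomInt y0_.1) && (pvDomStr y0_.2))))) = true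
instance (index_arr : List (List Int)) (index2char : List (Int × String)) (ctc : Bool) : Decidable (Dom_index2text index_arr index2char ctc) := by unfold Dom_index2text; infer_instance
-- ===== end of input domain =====

-- B replaces A's build-marker-string/split/remove_same pipeline in the ctc branch by a single pass
-- over the index sequence carrying an Option-valued last character (objective: simpler).

-- ===== PORT A =====
-- index2char[index]: dict lookup, first match; Python raises KeyError on a missing key — that
-- case is excluded by Pre_, "" stands in for the unreachable raised case.
def pvLookup (d : List (Int × String)) (i : Int) : String := (PySem.Dict.mk d).getD i ""

-- remove_same: rel/last_char loop; A's last_char starts as '' (matching no char), here Option Char.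
def rsGo (last : Option Char) : List Char → List Char
  | [] => []
  | c :: rest => if some c == last then rsGo last rest else c :: rsGo (some c) rest

def removeSame (line : List Char) : List Char := rsGo none line

-- the ctc-branch inner loop: line += '&&blank&&' / char, with break on 'EOF'
def buildCtcLine (d : List (Int × String)) : List Int → List Char
  | [] => []
  | i :: rest =>
    let char := pvLookup d i
    if char = "EOF" then []
    else if char = "blank" then "&&blank&&".toList ++ buildCtcLine d rest
    else char.toList ++ buildCtcLine d rest

-- the non-ctc inner loop: line += char, with break on 'EOF'
def buildPlainLine (d : List (Int × String)) : List Int → List Char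
  | [] => []
  | i :: rest =>
    let char := pvLookup d i
    if char = "EOF" then []
    else char.toList ++ buildPlainLine d rest

def index2text (index_arr : List (List Int)) (index2char : List (Int × String)) (ctc : Bool) : List String :=
  index_arr.map (fun index_seq =>
    if ctc then
      let line := buildCtcLine index2char index_seq
      let items := (PySem.Chars.splitOn line "&&blank&&".toList).map removeSame
      String.ofList (PySem.Chars.join [] items)
    else
      String.ofList (buildPlainLine index2char index_seq))

-- ===== PORT B =====
-- the inner 'for ch in tok' loop of B: returns (chars appended, updated last)
def emitTok (last : Option Char) : List Char → List Char × Option Char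
  | [] => ([], last)
  | c :: rest =>
    if (some c == last : Bool) then emitTok last rest
    else ((emitTok (some c) rest).1.cons c, (emitTok (some c) rest).2)

-- B's ctc loop: one pass, last := none on 'blank', break on 'EOF'
def ctcLine (d : List (Int × String)) : Option Char → List Int → List Char
  | _, [] => []
  | last, i :: rest =>
    let tok := pvLookup d i
    if tok = "EOF" then []
    else if tok = "blank" then ctcLine d none rest
    else (emitTok last tok.toList).1 ++ ctcLine d (emitTok last tok.toList).2 rest

-- B's non-ctc loop (kept as in A's source)
def plainLine (d : List (Int × String)) : List Int → List Char
  | [] => []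
  | i :: rest =>
    let tok := pvLookup d i
    if tok = "EOF" then []
    else tok.toList ++ plainLine d rest

def index2text_alt (index_arr : List (List Int)) (index2char : List (Int × String)) (ctc : Bool) : List String :=
  index_arr.map (fun index_seq =>
    if ctc then String.ofList (ctcLine index2char none index_seq)
    else String.ofList (plainLine index2char index_seq))

-- ===== PRECONDITION & SPEC =====
-- Pre_ excludes (a) inputs where some sequence references an index missing from index2char —
-- Python raises KeyError there; to stay closed-form this also drops the rare inputs where the
-- missing index sits after an 'EOF' and A still returns — and (b) in ctc mode, mappings of
-- referenced keys to strings containing '&', where A's internal '&&blank&&' split marker can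
-- collide with the data and A's result is an artefact of that encoding B cannot share.
def Pre_index2text (index_arr : List (List Int)) (index2char : List (Int × String)) (ctc : Bool) : Prop :=
  (∀ seq ∈ index_arr, ∀ i ∈ seq, (PySem.Dict.mk index2char).contains i = true) ∧
  (ctc = true → ∀ p ∈ index2char, (∃ seq ∈ index_arr, p.1 ∈ seq) →
      p.2 = "EOF" ∨ p.2 = "blank" ∨ '&' ∉ p.2.toList)
instance (index_arr : List (List Int)) (index2char : List (Int × String)) (ctc : Bool) : Decidable (Pre_index2text index_arr index2char ctc) := by unfold Pre_index2text; infer_instance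

def pvWitness_index2text : List (List Int) × (List (Int × String)) × Bool :=
  ([[0, 1, 1, 0, 2, 0]], [(0, "a"), (1, "blank"), (2, "EOF")], true)

def Spec_index2text (index_arr : List (List Int)) (index2char : List (Int × String)) (ctc : Bool) (out : List String) : Prop := out = index2text_alt index_arr index2char ctc
instance (index_arr : List (List Int)) (index2char : List (Int × String)) (ctc : Bool) (out : List String) : Decidable (Spec_index2text index_arr index2char ctc out) := by unfold Spec_index2text; infer_instance

-- ===== CLAIM (what is proved, stated in full; the proofs are below) =====
def Claim_equal_index2text : Prop := ∀ (index_arr : List (List Int)) (index2char : List (Int × String)) (ctc : Bool), Dom_index2text index_arr index2char ctc → Pre_index2text index_arr index2char ctc → Spec_index2text index_arr index2char ctc (index2text index_arr index2char ctc)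

-- ===== LEMMAS AND PROOFS =====

-- fuel-free reformulation of PySem.Chars.splitOn.go at sep = '&&blank&&'
def msGo : List Char → List Char → List (List Char)
  | [], cur => [cur.reverse]
  | c :: rest, cur =>
    if "&&blank&&".toList.isPrefixOf (c :: rest) then
      cur.reverse :: msGo ((c :: rest).drop "&&blank&&".toList.length) []
    else msGo rest (c :: cur)
termination_by l _ => l.length
decreasing_by
  · simp
  · simp

-- the char last seen after feeding t from state last
def lastAfter (last : Option Char) (t : List Char) : Option Char :=
  t.foldl (fun _ c => some c) last

-- A's per-segment post-processing, with the first segment started from state last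
def procSegs (last : Option Char) : List (List Char) → List Char
  | [] => []
  | seg :: rest => rsGo last seg ++ (rest.map (rsGo none)).flatten

lemma go_eq (fuel : Nat) (l cur : List Char) (acc : List (List Char)) (h : l.length < fuel) :
    PySem.Chars.splitOn.go "&&blank&&".toList fuel l cur acc = acc.reverse ++ msGo l cur := by
  induction fuel generalizing l cur acc with
  | zero => omega
  | succ f ih =>
    cases l with
    | nil =>
      rw [PySem.Chars.splitOn.go]
      · simp [msGo]
      · omega
    | cons c rest =>
      rw [PySem.Chars.splitOn.go]
      by_cases hp : "&&blank&&".toList.isPrefixOf (c :: rest)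
      · rw [if_pos hp, ih _ _ _ (by
          have hlen := (List.isPrefixOf_iff_prefix.mp hp).length_le
          have h9 : ("&&blank&&".toList).length = 9 := rfl
          rw [List.length_drop, h9]
          rw [h9] at hlen
          omega)]
        rw [msGo, if_pos hp]
        simp
      · rw [if_neg hp, ih _ _ _ (by simp at h ⊢; omega)]
        rw [msGo, if_neg hp]

lemma splitOn_eq (l : List Char) :
    PySem.Chars.splitOn l "&&blank&&".toList = msGo l [] := by
  have h := go_eq (l.length + 1) l [] [] (by omega)
  simpa [PySem.Chars.splitOn] using h

lemma msGo_ne_nil (l cur : List Char) : msGo l cur ≠ [] := by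
  induction l, cur using msGo.induct with
  | case1 cur => simp [msGo]
  | case2 c rest cur hp ih => rw [msGo, if_pos hp]; simp
  | case3 c rest cur hp ih => rw [msGo, if_neg hp]; exact ih

lemma msGo_cur (l cur : List Char) :
    msGo l cur = (msGo l []).modifyHead (cur.reverse ++ ·) := by
  suffices H : ∀ n (l cur : List Char), l.length ≤ n →
      msGo l cur = (msGo l []).modifyHead (cur.reverse ++ ·) from H l.length l cur le_rfl
  intro n
  induction n with
  | zero =>
    intro l cur h
    have : l = [] := by cases l <;> simp_all
    subst this; simp [msGo]
  | succ n ih =>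
    intro l cur h
    cases l with
    | nil => simp [msGo]
    | cons c rest =>
      rw [msGo, msGo]
      by_cases hp : "&&blank&&".toList.isPrefixOf (c :: rest)
      · rw [if_pos hp, if_pos hp]; simp
      · rw [if_neg hp, if_neg hp]
        have h1 : rest.length ≤ n := by simp at h; omega
        rw [ih rest (c :: cur) h1, ih rest [c] h1]
        cases hm : msGo rest [] with
        | nil => exact absurd hm (msGo_ne_nil rest [])
        | cons s0 tl => simp [List.modifyHead]

lemma msGo_marker (s cur : List Char) :
    msGo ("&&blank&&".toList ++ s) cur = cur.reverse :: msGo s [] := by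
  have hp : "&&blank&&".toList.isPrefixOf ("&&blank&&".toList ++ s) = true := by
    rw [List.isPrefixOf_iff_prefix]; exact List.prefix_append _ _
  rw [show ("&&blank&&".toList ++ s) = '&'::'&'::'b'::'l'::'a'::'n'::'k'::'&'::'&'::s from rfl] at hp ⊢
  rw [msGo, if_pos hp]
  simp

lemma msGo_ampfree (t s cur : List Char) (h : '&' ∉ t) :
    msGo (t ++ s) cur = msGo s (t.reverse ++ cur) := by
  induction t generalizing cur with
  | nil => simp
  | cons c t' ih =>
    have hc : c ≠ '&' := fun hc => h (hc ▸ List.mem_cons_self)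
    have hp : ¬ ("&&blank&&".toList.isPrefixOf (c :: (t' ++ s)) = true) := by
      rw [List.isPrefixOf_iff_prefix]
      intro hpre
      obtain ⟨r, hr⟩ := hpre
      rw [show "&&blank&&".toList = '&' :: "&blank&&".toList from rfl] at hr
      simp only [List.cons_append, List.cons.injEq] at hr
      exact hc hr.1.symm
    rw [List.cons_append, msGo, if_neg hp]
    rw [ih _ (fun hm => h (List.mem_cons_of_mem _ hm))]
    simp

lemma rsGo_append (last : Option Char) (t u : List Char) :
    rsGo last (t ++ u) = rsGo last t ++ rsGo (lastAfter last t) u := by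
  induction t generalizing last with
  | nil => simp [rsGo, lastAfter]
  | cons c t' ih =>
    rw [List.cons_append, rsGo, rsGo]
    by_cases hc : some c = last
    · subst hc
      simp only [beq_self_eq_true, if_true]
      have hl : lastAfter (some c) (c :: t') = lastAfter (some c) t' := rfl
      rw [hl, ih]
    · have hb : (some c == last) = false := by simp [hc]
      simp only [hb, Bool.false_eq_true, if_false]
      have hl : lastAfter last (c :: t') = lastAfter (some c) t' := rfl
      rw [hl, ih, List.cons_append]

lemma emitTok_eq (last : Option Char) (t : List Char) :
    emitTok last t = (rsGo last t, lastAfter last t) := by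
  induction t generalizing last with
  | nil => simp [emitTok, rsGo, lastAfter]
  | cons c t' ih =>
    rw [emitTok, rsGo]
    by_cases hc : some c = last
    · subst hc
      simp only [beq_self_eq_true, if_true]
      rw [ih]
      rfl
    · have hb : (some c == last) = false := by simp [hc]
      simp only [hb, Bool.false_eq_true, if_false, ih]
      rfl

lemma procSegs_blank (last : Option Char) (segs : List (List Char)) (h : segs ≠ []) :
    procSegs last ([] :: segs) = procSegs none segs := by
  cases segs with
  | nil => exact absurd rfl h
  | cons s0 tl => simp [procSegs, rsGo]

lemma procSegs_tok (last last' : Option Char) (t : List Char) (segs : List (List Char))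
    (h : segs ≠ []) (ht : rsGo last (t ++ segs.headI) = rsGo last t ++ rsGo last' segs.headI) :
    procSegs last ((t ++ segs.headI) :: segs.tail) = rsGo last t ++ procSegs last' segs := by
  cases segs with
  | nil => exact absurd rfl h
  | cons s0 tl =>
    simp only [List.headI] at ht
    simp [procSegs, ht]

lemma ctc_main (d : List (Int × String)) (seq : List Int)
    (H : ∀ i ∈ seq, ∀ v, (PySem.Dict.mk d).get? i = some v →
          v ≠ "EOF" → v ≠ "blank" → '&' ∉ v.toList) (last : Option Char) :
    procSegs last (msGo (buildCtcLine d seq) []) = ctcLine d last seq := by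
  induction seq generalizing last with
  | nil => simp [buildCtcLine, msGo, procSegs, rsGo, ctcLine]
  | cons i rest ih =>
    have Hrest : ∀ j ∈ rest, ∀ v, (PySem.Dict.mk d).get? j = some v →
        v ≠ "EOF" → v ≠ "blank" → '&' ∉ v.toList :=
      fun j hj => H j (List.mem_cons_of_mem _ hj)
    simp only [buildCtcLine, ctcLine]
    by_cases hE : pvLookup d i = "EOF"
    · rw [if_pos hE, if_pos hE]
      simp [msGo, procSegs, rsGo]
    · by_cases hB : pvLookup d i = "blank"
      · rw [if_neg hE, if_neg hE, if_pos hB, if_pos hB]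
        rw [msGo_marker]
        simp only [List.reverse_nil]
        rw [procSegs_blank _ _ (msGo_ne_nil _ _)]
        exact ih Hrest none
      · have hAmp : '&' ∉ (pvLookup d i).toList := by
          cases hg : (PySem.Dict.mk d).get? i with
          | none => simp [pvLookup, PySem.Dict.getD, hg]
          | some w =>
            have hv : pvLookup d i = w := by simp [pvLookup, PySem.Dict.getD, hg]
            rw [hv] at hE hB ⊢
            exact H i List.mem_cons_self w hg hE hB
        rw [if_neg hE, if_neg hE, if_neg hB, if_neg hB]
        rw [msGo_ampfree _ _ _ hAmp]
        simp only [List.append_nil]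
        rw [msGo_cur]
        cases hm : msGo (buildCtcLine d rest) [] with
        | nil => exact absurd hm (msGo_ne_nil _ _)
        | cons s0 tl =>
          simp only [List.modifyHead, List.reverse_reverse]
          rw [emitTok_eq]
          have := procSegs_tok last (lastAfter last (pvLookup d i).toList)
            (pvLookup d i).toList (s0 :: tl) (by simp)
            (by simp only [List.headI]; exact rsGo_append _ _ _)
          simp only [List.headI, List.tail_cons] at this
          rw [this, ← hm, ih Hrest]

lemma a_ctc_eq (d : List (Int × String)) (seq : List Int)
    (H : ∀ i ∈ seq, ∀ v, (PySem.Dict.mk d).get? i = some v →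
          v ≠ "EOF" → v ≠ "blank" → '&' ∉ v.toList) :
    PySem.Chars.join [] ((PySem.Chars.splitOn (buildCtcLine d seq) "&&blank&&".toList).map removeSame)
      = ctcLine d none seq := by
  rw [splitOn_eq]
  have hj : ∀ parts : List (List Char), PySem.Chars.join [] parts = parts.flatten := by
    intro parts
    induction parts with
    | nil => rfl
    | cons h t ih => cases t <;> simp_all [PySem.Chars.join, List.intercalate, List.intersperse]
  rw [hj]
  cases hm : msGo (buildCtcLine d seq) [] with
  | nil => exact absurd hm (msGo_ne_nil _ _)
  | cons s0 tl =>
    have := ctc_main d seq H none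
    rw [hm] at this
    simpa [procSegs, removeSame] using this

lemma plain_eq (d : List (Int × String)) (seq : List Int) :
    buildPlainLine d seq = plainLine d seq := by
  induction seq with
  | nil => rfl
  | cons i rest ih =>
    rw [buildPlainLine, plainLine]
    split_ifs <;> simp [ih]

-- ===== VERDICT (by name: the statement is the Claim_ definition above) =====
theorem index2text_spec : Claim_equal_index2text := by
  intro index_arr index2char ctc hdom hpre
  unfold Spec_index2text index2text index2text_alt
  apply List.map_congr_left
  intro seq hseq
  cases ctc with
  | false => simp [plain_eq]
  | true =>
    simp only [if_true]
    refine congrArg String.ofList (a_ctc_eq index2char seq ?_)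
    intro i hi v hg hE hB
    obtain ⟨hkeys, hamp⟩ := hpre
    have hmem : (i, v) ∈ index2char := PySem.Dict.mem_items_of_get?_eq_some _ hg
    rcases hamp rfl (i, v) hmem ⟨seq, hseq, hi⟩ with h1 | h1 | h1
    · exact absurd h1 hE
    · exact absurd h1 hB
    · exact h1
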